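-- pv_equiv track=rewrite | github.com/Daekyue/Baekjoon | 백준/Gold/3020. 개똥벌레/개똥벌레.py | solve_firefly
-- ===== SOURCE A (Python) =====
-- def solve_firefly(n, h, heights):
--     bottom = [0] * (h + 1)  # 석순
--     top = [0] * (h + 1)     # 종유석
--
--     # 석순과 종유석을 구분하여 카운트
--     for i in range(n):
--         if i % 2 == 0:
--             bottom[heights[i]] += 1
--         else:
--             top[heights[i]] += 1
--
--     # 누적합 계산 (아래에서 위로 올라가며)
--     for i in range(h-1, 0, -1):
--         bottom[i] += bottom[i+1]
--         top[i] += top[i+1]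
--
--     min_obstacle = n  # 최소 장애물 수 초기화
--     cnt = 0  # 최소 장애물을 만나는 구간 수
--
--     for i in range(1, h+1):
--         total = bottom[i] + top[h - i + 1]
--
--         if total < min_obstacle:
--             min_obstacle = total
--             cnt = 1
--         elif total == min_obstacle:
--             cnt += 1
--
--     return min_obstacle, cnt
-- ===== SOURCE B (Python) =====
-- def solve_firefly(n, h, heights):
--     bottoms = [heights[k] for k in range(n) if k % 2 == 0]
--     tops = [heights[k] for k in range(n) if k % 2 == 1]
--     totals = [sum(1 for x in bottoms if x >= i) + sum(1 for x in tops if x >= h - i + 1)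
--               for i in range(1, h + 1)]
--     if not totals:
--         return n, 0
--     best = min(totals)
--     return best, totals.count(best)
-- ===== Notes on version B (the rewrite author's own statement) =====
-- stated objective: simpler
-- what changed: Replaces the histogram arrays + suffix-sum pass + manual min/tie sweep by splitting the first n heights into even/odd-position lists, counting each section's crossings directly, and returning min(totals) with totals.count(best).
-- outside the precondition, e.g. on solve_firefly(1, 2, [-1]): A returns (1, 2), B returns (0, 2); on solve_firefly(-2, 3, [1]): A returns (-2, 0), B returns (0, 3); on solve_firefly(1, 2, [-5]): A raises IndexError, B returns (0, 2)
import Mathlib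
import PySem

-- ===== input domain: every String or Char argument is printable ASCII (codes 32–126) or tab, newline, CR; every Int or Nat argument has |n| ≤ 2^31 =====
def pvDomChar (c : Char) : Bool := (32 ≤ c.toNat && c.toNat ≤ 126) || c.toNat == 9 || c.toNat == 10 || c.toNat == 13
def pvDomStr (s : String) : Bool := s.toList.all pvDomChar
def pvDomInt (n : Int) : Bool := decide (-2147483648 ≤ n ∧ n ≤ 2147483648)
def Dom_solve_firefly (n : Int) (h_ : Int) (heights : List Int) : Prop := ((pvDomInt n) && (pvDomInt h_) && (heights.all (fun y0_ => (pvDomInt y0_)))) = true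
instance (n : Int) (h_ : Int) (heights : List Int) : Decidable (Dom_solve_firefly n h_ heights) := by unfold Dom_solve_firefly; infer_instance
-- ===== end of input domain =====

-- B replaces the histogram arrays + suffix-sum pass + manual min/tie sweep by direct per-section
-- counting over the even/odd-position heights and min/count on the list of totals (simpler, not faster).

-- ===== PORT A =====
/-- Python's index resolution (negative index wraps; `none` = IndexError) on an array:
    the same rule as `PySem.List.pyIdx?`, with O(1) element access (Python lists are arrays). -/
def aGet? (a : Array Int) (i : Int) : Option Int :=
  (PySem.List.pyIdx? a.size i).bind (fun k => a[k]?)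

def aGetD (a : Array Int) (i : Int) (d : Int) : Int := (aGet? a i).getD d

def aSet? (a : Array Int) (i : Int) (v : Int) : Option (Array Int) :=
  (PySem.List.pyIdx? a.size i).map (fun k => a.setIfInBounds k v)

def aSetD (a : Array Int) (i : Int) (v : Int) : Array Int := (aSet? a i v).getD a

/-- Python `lst[i] += 1` (`none` = IndexError). -/
def pyIncAt (a : Array Int) (i : Int) : Option (Array Int) :=
  match aGet? a i with
  | none => none
  | some v => aSet? a i (v + 1)

/-- body of A's first loop (`none` once the Python has raised). -/
def loop1body (heights : List Int) (st : Option (Array Int × Array Int)) (i : Int) :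
    Option (Array Int × Array Int) :=
  match st with
  | none => none
  | some (b, t) =>
    match PySem.List.pyGet? heights i with
    | none => none
    | some x =>
      if PySem.Int.mod i 2 = 0 then
        match pyIncAt b x with
        | none => none
        | some b' => some (b', t)
      else
        match pyIncAt t x with
        | none => none
        | some t' => some (b, t')

/-- body of A's suffix-sum loop, on one array: `arr[i] += arr[i+1]`
    (indices are always in range there, so the total `aSetD`/`aGetD` forms are exact). -/
def suffStep (b : Array Int) (i : Int) : Array Int :=
  aSetD b i (aGetD b i 0 + aGetD b (i + 1) 0)

/-- body of A's third loop (min/tie sweep), reading the two finished arrays. -/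
def loop3body (b t : Array Int) (h_ : Int) (mc : Int × Int) (i : Int) : Int × Int :=
  let total := aGetD b i 0 + aGetD t (h_ - i + 1) 0
  if total < mc.1 then (total, 1)
  else if total = mc.1 then (mc.1, mc.2 + 1)
  else mc

def solve_firefly (n : Int) (h_ : Int) (heights : List Int) : Int × Int :=
  let st :=
    (PySem.List.pyRange 0 n 1).foldl (loop1body heights)
      (some (Array.replicate (h_ + 1).toNat (0 : Int), Array.replicate (h_ + 1).toNat (0 : Int)))
  match st with
  | none => (0, 0)  -- unreachable under Pre_: the Python raises IndexError here
  | some (b1, t1) =>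
    let st2 :=
      (PySem.List.pyRange (h_ - 1) 0 (-1)).foldl
        (fun (p : Array Int × Array Int) i => (suffStep p.1 i, suffStep p.2 i)) (b1, t1)
    (PySem.List.pyRange 1 (h_ + 1) 1).foldl (loop3body st2.1 st2.2 h_) (n, 0)

-- ===== PORT B =====
def solve_firefly_alt (n : Int) (h_ : Int) (heights : List Int) : Int × Int :=
  let bottoms := ((PySem.List.pyRange 0 n 1).filter (fun k => PySem.Int.mod k 2 == 0)).map
      (fun k => PySem.List.pyGetD heights k 0)
  let tops := ((PySem.List.pyRange 0 n 1).filter (fun k => PySem.Int.mod k 2 == 1)).map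
      (fun k => PySem.List.pyGetD heights k 0)
  let totals := (PySem.List.pyRange 1 (h_ + 1) 1).map (fun i =>
      ((bottoms.countP (fun x => decide (i ≤ x))) : Int) +
      ((tops.countP (fun x => decide (h_ - i + 1 ≤ x))) : Int))
  match totals with
  | [] => (n, 0)
  | _ :: _ =>
    match PySem.List.min? totals (fun x => x) with
    | none => (n, 0)  -- unreachable: totals ≠ []
    | some best => (best, (PySem.List.count totals best : Int))

-- ===== PRECONDITION & SPEC =====
-- Pre_ is the problem's natural domain — heights in 0..h, 0 ≤ n ≤ len(heights) — plus the
-- degenerate inputs n ≤ 0 ∧ h ≤ 0, on which both programs return (n, 0).  It excludes inputs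
-- where A raises IndexError (n > len(heights), h < 0 with n ≥ 1, a height > h or < -(h+1)) and
-- two kinds of input where A returns an accidental value of its implementation: a height in
-- [-(h+1), -1], which A's negative-index wraparound counts as an obstacle of height ≈ h, and a
-- negative n with h ≥ 1, where A returns its n-initialised minimum as (n, 0) (see cites).
def Pre_solve_firefly (n : Int) (h_ : Int) (heights : List Int) : Prop :=
  n ≤ (heights.length : Int) ∧ (0 ≤ h_ ∨ n ≤ 0) ∧ (0 ≤ n ∨ h_ ≤ 0) ∧
    ∀ x ∈ heights.take n.toNat, 0 ≤ x ∧ x ≤ h_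
instance (n : Int) (h_ : Int) (heights : List Int) : Decidable (Pre_solve_firefly n h_ heights) := by
  unfold Pre_solve_firefly; infer_instance

def pvWitness_solve_firefly : Int × Int × List Int := (4, 3, [1, 2, 3, 1])

def Spec_solve_firefly (n : Int) (h_ : Int) (heights : List Int) (out : Int × Int) : Prop := out = solve_firefly_alt n h_ heights
instance (n : Int) (h_ : Int) (heights : List Int) (out : Int × Int) : Decidable (Spec_solve_firefly n h_ heights out) := by unfold Spec_solve_firefly; infer_instance

-- ===== CLAIM (what is proved, stated in full; the proofs are below) =====
def Claim_equal_solve_firefly : Prop := ∀ (n : Int) (h_ : Int) (heights : List Int), Dom_solve_firefly n h_ heights → Pre_solve_firefly n h_ heights → Spec_solve_firefly n h_ heights (solve_firefly n h_ heights)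

-- ===== LEMMAS AND PROOFS =====

-- List-side twins of A's loop bodies (the original arrays as plain lists), used only in proofs.
def pyIncAtL (l : List Int) (i : Int) : Option (List Int) :=
  match PySem.List.pyGet? l i with
  | none => none
  | some v => PySem.List.pySet? l i (v + 1)

def loop1bodyL (heights : List Int) (st : Option (List Int × List Int)) (i : Int) :
    Option (List Int × List Int) :=
  match st with
  | none => none
  | some (b, t) =>
    match PySem.List.pyGet? heights i with
    | none => none
    | some x =>
      if PySem.Int.mod i 2 = 0 then
        match pyIncAtL b x with
        | none => none
        | some b' => some (b', t)
      else
        match pyIncAtL t x with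
        | none => none
        | some t' => some (b, t')

def suffStepL (b : List Int) (i : Int) : List Int :=
  PySem.List.pySetD b i (PySem.List.pyGetD b i 0 + PySem.List.pyGetD b (i + 1) 0)

def loop3bodyL (b t : List Int) (h_ : Int) (mc : Int × Int) (i : Int) : Int × Int :=
  let total := PySem.List.pyGetD b i 0 + PySem.List.pyGetD t (h_ - i + 1) 0
  if total < mc.1 then (total, 1)
  else if total = mc.1 then (mc.1, mc.2 + 1)
  else mc

/-- `solve_firefly` with its arrays replayed as plain lists. -/
def solveAL (n : Int) (h_ : Int) (heights : List Int) : Int × Int :=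
  let st :=
    (PySem.List.pyRange 0 n 1).foldl (loop1bodyL heights)
      (some (List.replicate (h_ + 1).toNat (0 : Int), List.replicate (h_ + 1).toNat (0 : Int)))
  match st with
  | none => (0, 0)
  | some (b1, t1) =>
    let st2 :=
      (PySem.List.pyRange (h_ - 1) 0 (-1)).foldl
        (fun (p : List Int × List Int) i => (suffStepL p.1 i, suffStepL p.2 i)) (b1, t1)
    (PySem.List.pyRange 1 (h_ + 1) 1).foldl (loop3bodyL st2.1 st2.2 h_) (n, 0)

lemma aGet?_toList (a : Array Int) (i : Int) : aGet? a i = PySem.List.pyGet? a.toList i := by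
  unfold aGet? PySem.List.pyGet?
  rw [Array.length_toList]
  cases PySem.List.pyIdx? a.size i <;> simp [Array.getElem?_toList]

lemma aGetD_toList (a : Array Int) (i : Int) (d : Int) :
    aGetD a i d = PySem.List.pyGetD a.toList i d := by
  unfold aGetD PySem.List.pyGetD
  rw [aGet?_toList]

lemma aSet?_toList (a : Array Int) (i : Int) (v : Int) :
    (aSet? a i v).map Array.toList = PySem.List.pySet? a.toList i v := by
  unfold aSet? PySem.List.pySet?
  rw [Array.length_toList]
  cases PySem.List.pyIdx? a.size i <;> simp [Array.toList_setIfInBounds]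

lemma aSetD_toList (a : Array Int) (i : Int) (v : Int) :
    (aSetD a i v).toList = PySem.List.pySetD a.toList i v := by
  unfold aSetD PySem.List.pySetD
  rw [← aSet?_toList]
  cases aSet? a i v <;> simp

lemma pyIncAt_toList (a : Array Int) (i : Int) :
    (pyIncAt a i).map Array.toList = pyIncAtL a.toList i := by
  unfold pyIncAt pyIncAtL
  rw [← aGet?_toList]
  cases aGet? a i
  · rfl
  · exact aSet?_toList a i _

lemma suffStep_toList (b : Array Int) (i : Int) :
    (suffStep b i).toList = suffStepL b.toList i := by
  unfold suffStep suffStepL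
  rw [aSetD_toList, aGetD_toList, aGetD_toList]

lemma loop3body_toList (b t : Array Int) (h_ : Int) (mc : Int × Int) (i : Int) :
    loop3body b t h_ mc i = loop3bodyL b.toList t.toList h_ mc i := by
  unfold loop3body loop3bodyL
  rw [aGetD_toList, aGetD_toList]

lemma loop1body_toList (heights : List Int) (st : Option (Array Int × Array Int)) (i : Int) :
    (loop1body heights st i).map (fun p => (p.1.toList, p.2.toList))
      = loop1bodyL heights (st.map (fun p => (p.1.toList, p.2.toList))) i := by
  cases st with
  | none => rfl
  | some p =>
    obtain ⟨b, t⟩ := p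
    unfold loop1body loop1bodyL
    dsimp only [Option.map_some]
    cases PySem.List.pyGet? heights i with
    | none => rfl
    | some x =>
      dsimp only
      by_cases hpar : PySem.Int.mod i 2 = 0
      · rw [if_pos hpar, if_pos hpar, ← pyIncAt_toList]
        cases pyIncAt b x <;> rfl
      · rw [if_neg hpar, if_neg hpar, ← pyIncAt_toList]
        cases pyIncAt t x <;> rfl

lemma solve_firefly_eq_list (n : Int) (h_ : Int) (heights : List Int) :
    solve_firefly n h_ heights = solveAL n h_ heights := by
  unfold solve_firefly solveAL
  have hloop1 := List.foldl_hom
    (f := fun st : Option (Array Int × Array Int) => st.map (fun p => (p.1.toList, p.2.toList)))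
    (g₁ := loop1body heights) (g₂ := loop1bodyL heights)
    (l := PySem.List.pyRange 0 n 1)
    (init := some (Array.replicate (h_ + 1).toNat (0 : Int), Array.replicate (h_ + 1).toNat (0 : Int)))
    (fun st i => (loop1body_toList heights st i).symm)
  simp only [Option.map_some, Array.toList_replicate] at hloop1
  rw [hloop1]
  cases hst : (PySem.List.pyRange 0 n 1).foldl (loop1body heights)
      (some (Array.replicate (h_ + 1).toNat (0 : Int), Array.replicate (h_ + 1).toNat (0 : Int))) with
  | none => rfl
  | some p =>
    obtain ⟨b1, t1⟩ := p
    dsimp only [Option.map_some]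
    have hloop2 := List.foldl_hom
      (f := fun p : Array Int × Array Int => (p.1.toList, p.2.toList))
      (g₁ := fun (p : Array Int × Array Int) i => (suffStep p.1 i, suffStep p.2 i))
      (g₂ := fun (p : List Int × List Int) i => (suffStepL p.1 i, suffStepL p.2 i))
      (l := PySem.List.pyRange (h_ - 1) 0 (-1)) (init := (b1, t1))
      (fun p i => by simp [suffStep_toList])
    rw [hloop2]
    apply PySem.List.foldl_congr_mem
    intro mc i _
    exact loop3body_toList _ _ h_ mc i

/-- `[count of j in l | j in range N]` — the histogram A's first loop builds. -/
def hist (N : Nat) (l : List Int) : List Int :=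
  (List.range N).map (fun j => (l.count ((j : Nat) : Int) : Int))

/-- the partially suffix-summed array: positions `> a` cumulative, positions `≤ a` raw. -/
def mix (N : Nat) (l : List Int) (a : Nat) : List Int :=
  (List.range N).map (fun j =>
    if a < j then (l.countP (fun x => decide ((j : Int) ≤ x)) : Int)
    else (l.count ((j : Nat) : Int) : Int))

/-- the heights at positions `k < m` with `k % 2 = r`. -/
def selP (heights : List Int) (m : Nat) (r : Int) : List Int :=
  ((List.range m).filter (fun k => ((k % 2 : Nat) : Int) == r)).map (fun k => heights.getD k 0)

/-- one step of A's min/tie sweep. -/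
def sweepStep (mc : Int × Int) (t : Int) : Int × Int :=
  if t < mc.1 then (t, 1) else if t = mc.1 then (mc.1, mc.2 + 1) else mc

/-- the crossing count of section `i`. -/
def totFn (heights : List Int) (M H : Nat) (i : Int) : Int :=
  (((selP heights M 0).countP (fun x => decide (i ≤ x))) : Int) +
  (((selP heights M 1).countP (fun x => decide ((H : Int) - i + 1 ≤ x))) : Int)

/-- the per-section crossing counts both programs are about. -/
def totalsOf (heights : List Int) (M H : Nat) : List Int :=
  (PySem.List.pyRange 1 ((H : Int) + 1) 1).map (totFn heights M H)

lemma hist_nil (N : Nat) : hist N [] = List.replicate N 0 := by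
  apply List.ext_getElem <;> simp [hist]

lemma pyIncAtL_hist (N : Nat) (l : List Int) (x : Int) (hx0 : 0 ≤ x) (hxN : x.toNat < N) :
    pyIncAtL (hist N l) x = some (hist N (l ++ [x])) := by
  obtain ⟨m, rfl⟩ : ∃ m : Nat, x = (m : Int) := ⟨x.toNat, (Int.toNat_of_nonneg hx0).symm⟩
  have hmN : m < N := by simpa using hxN
  have hlen : (hist N l).length = N := by simp [hist]
  unfold pyIncAtL
  rw [PySem.List.pyGet?_natCast, List.getElem?_eq_getElem (by omega)]
  dsimp only
  rw [PySem.List.pySet?_natCast _ _ _ (by omega)]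
  congr 1
  apply List.ext_getElem
  · simp [hist]
  · intro j hj1 hj2
    have hjN : j < N := by simpa [hist] using hj2
    simp only [hist, List.getElem_set, List.getElem_map, List.getElem_range,
      List.count_append]
    by_cases hjm : j = m
    · subst hjm
      simp
    · have : ((m : Int)) ≠ ((j : Nat) : Int) := by
        intro hc; exact hjm (by exact_mod_cast hc.symm)
      simp [this]
      intro hc; exact absurd hc.symm hjm

lemma loop1_eq (heights : List Int) (N : Nat) (m : Nat) (hm : m ≤ heights.length)
    (hb : ∀ k < m, 0 ≤ heights.getD k 0 ∧ (heights.getD k 0).toNat < N) :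
    (List.range m).foldl (fun st k => loop1bodyL heights st ((k : Nat) : Int))
        (some (hist N [], hist N [])) =
      some (hist N (selP heights m 0), hist N (selP heights m 1)) := by
  induction m with
  | zero => rfl
  | succ m ih =>
    rw [List.range_succ, List.foldl_append]
    rw [ih (by omega) (fun k hk => hb k (by omega))]
    have hmlen : m < heights.length := by omega
    have hget : PySem.List.pyGet? heights ((m : Nat) : Int) = some (heights.getD m 0) := by
      rw [PySem.List.pyGet?_natCast, List.getElem?_eq_getElem hmlen, List.getD_eq_getElem _ _ hmlen]
    have hmod : PySem.Int.mod ((m : Nat) : Int) 2 = ((m % 2 : Nat) : Int) := by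
      exact_mod_cast PySem.Int.mod_natCast m 2
    obtain ⟨hx0, hxN⟩ := hb m (by omega)
    simp only [List.foldl_cons, List.foldl_nil, loop1bodyL, hget, hmod]
    by_cases hpar : m % 2 = 0
    · rw [if_pos (by exact_mod_cast hpar)]
      rw [pyIncAtL_hist N _ _ hx0 hxN]
      have h0 : selP heights (m+1) 0 = selP heights m 0 ++ [heights.getD m 0] := by
        unfold selP
        rw [List.range_succ, List.filter_append,
          show List.filter (fun k => ((k % 2 : Nat) : Int) == 0) [m] = [m] by
            simp [List.filter, hpar],
          List.map_append]
        rfl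
      have h1 : selP heights (m+1) 1 = selP heights m 1 := by
        unfold selP
        rw [List.range_succ, List.filter_append,
          show List.filter (fun k => ((k % 2 : Nat) : Int) == 1) [m] = [] by
            simp [List.filter, hpar],
          List.append_nil]
      rw [h0, h1]
    · have hpar1 : m % 2 = 1 := by omega
      rw [if_neg (by simp [hpar1])]
      rw [pyIncAtL_hist N _ _ hx0 hxN]
      have h0 : selP heights (m+1) 0 = selP heights m 0 := by
        unfold selP
        rw [List.range_succ, List.filter_append,
          show List.filter (fun k => ((k % 2 : Nat) : Int) == 0) [m] = [] by
            simp [List.filter, hpar1],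
          List.append_nil]
      have h1 : selP heights (m+1) 1 = selP heights m 1 ++ [heights.getD m 0] := by
        unfold selP
        rw [List.range_succ, List.filter_append,
          show List.filter (fun k => ((k % 2 : Nat) : Int) == 1) [m] = [m] by
            simp [List.filter, hpar1],
          List.map_append]
        rfl
      rw [h0, h1]

lemma count_add_countP (l : List Int) (v : Int) :
    (l.count v : Int) + (l.countP (fun x => decide (v + 1 ≤ x)) : Int)
      = (l.countP (fun x => decide (v ≤ x)) : Int) := by
  induction l with
  | nil => simp
  | cons y t ih =>
    simp only [List.count_cons, List.countP_cons]
    by_cases h1 : y = v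
    · subst h1
      simp only [BEq.rfl, if_true,
        show decide (y+1 ≤ y) = false by simp only [decide_eq_false_iff_not]; omega,
        decide_eq_true (le_refl y)]
      push_cast at ih ⊢; omega
    · by_cases h2 : v + 1 ≤ y
      · simp only [show (y == v) = false by simp [h1], decide_eq_true h2,
          decide_eq_true (show v ≤ y by omega)]
        push_cast at ih ⊢; omega
      · simp only [show (y == v) = false by simp [h1],
          show decide (v+1 ≤ y) = false by simp only [decide_eq_false_iff_not]; omega,
          show decide (v ≤ y) = false by simp only [decide_eq_false_iff_not]; omega]
        push_cast at ih ⊢; omega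

lemma mix_read (H : Nat) (l : List Int) (i : Nat) (hi1 : 1 ≤ i) (hiH : i ≤ H) :
    PySem.List.pyGetD (mix (H + 1) l 0) (i : Int) 0
      = (l.countP (fun x => decide ((i : Int) ≤ x)) : Int) := by
  rw [PySem.List.pyGetD_natCast]
  unfold mix
  rw [PySem.List.getD_map_range _ _ _ _ (by omega)]
  simp [show 0 < i by omega]

lemma hist_eq_mix (H : Nat) (l : List Int) (hH : 1 ≤ H) (hb : ∀ x ∈ l, x ≤ (H : Int)) :
    hist (H + 1) l = mix (H + 1) l (H - 1) := by
  unfold hist mix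
  apply List.map_congr_left
  intro j hj
  have hjN : j < H + 1 := List.mem_range.mp hj
  by_cases hcase : H - 1 < j
  · have hjH : j = H := by omega
    subst hjH
    rw [if_pos hcase]
    congr 1
    rw [List.count_eq_countP]
    apply List.countP_congr
    intro x hx
    have hxH := hb x hx
    simp only [beq_iff_eq, decide_eq_true_eq]
    omega
  · simp [hcase]

lemma suffStepL_mix (N : Nat) (l : List Int) (a : Nat) (ha1 : 1 ≤ a) (haN : a + 1 < N) :
    suffStepL (mix N l a) (a : Int) = mix N l (a - 1) := by
  unfold suffStepL
  have hcast : ((a : Int) + 1) = ((a + 1 : Nat) : Int) := by push_cast; ring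
  rw [hcast, PySem.List.pyGetD_natCast, PySem.List.pyGetD_natCast, PySem.List.pySetD_natCast]
  conv_lhs =>
    rw [show (mix N l a).getD a 0 = (l.count ((a : Nat) : Int) : Int) by
          unfold mix; rw [PySem.List.getD_map_range _ _ _ _ (by omega)]; simp,
        show (mix N l a).getD (a+1) 0
            = (l.countP (fun x => decide (((a:Nat) : Int) + 1 ≤ x)) : Int) by
          unfold mix; rw [PySem.List.getD_map_range _ _ _ _ (by omega)]
          rw [if_pos (by omega)]; congr 1,
        count_add_countP]
  apply List.ext_getElem
  · simp [mix]
  · intro j hj1 hj2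
    have hjN : j < N := by simpa [mix] using hj2
    rw [List.getElem_set]
    unfold mix
    simp only [List.getElem_map, List.getElem_range]
    by_cases hja : a = j
    · subst hja
      rw [if_pos rfl, if_pos (by omega)]
    · rw [if_neg hja]
      by_cases haj : a < j
      · rw [if_pos haj, if_pos (by omega)]
      · rw [if_neg haj, if_neg (by omega)]

lemma loop2_run (H : Nat) (l : List Int) : ∀ (a : Nat), a < H →
    (PySem.List.pyRange (a : Int) 0 (-1)).foldl suffStepL (mix (H + 1) l a)
      = mix (H + 1) l 0 := by
  intro a
  induction a with
  | zero => intro _; rw [PySem.List.pyRange_neg_one_eq_nil (by omega)]; rfl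
  | succ a ih =>
    intro ha
    rw [PySem.List.pyRange_neg_one_cons (by exact_mod_cast Nat.succ_pos a)]
    rw [List.foldl_cons]
    have h1 : suffStepL (mix (H + 1) l (a + 1)) ((a + 1 : Nat) : Int) = mix (H + 1) l a := by
      have := suffStepL_mix (H + 1) l (a + 1) (by omega) (by omega)
      simpa using this
    rw [show ((a + 1 : Nat) : Int) - 1 = (a : Int) by omega]
    rw [h1]
    exact ih (by omega)

lemma sweep_eq (ts : List Int) : ∀ (m c : Int),
    ts.foldl (fun mc t =>
        if t < mc.1 then (t, (1 : Int)) else if t = mc.1 then (mc.1, mc.2 + 1) else mc) (m, c)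
      = (ts.foldl min m,
         if ts.foldl min m < m then (ts.count (ts.foldl min m) : Int)
         else c + (ts.count (ts.foldl min m) : Int)) := by
  induction ts with
  | nil => intro m c; simp
  | cons t rest ih =>
    intro m c
    simp only [List.foldl_cons]
    have hMle := (PySem.List.foldl_min_le rest (min m t)).1
    by_cases h1 : t < m
    · rw [show (if t < (m, c).1 then (t, (1:Int)) else if t = (m,c).1 then ((m,c).1, (m,c).2+1) else (m,c)) = (t, (1:Int)) by simp [h1]]
      rw [ih t 1]
      have hmt : min m t = t := by omega
      rw [hmt] at hMle ⊢
      have hMm : rest.foldl min t < m := by omega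
      rw [if_pos hMm]
      by_cases h2 : rest.foldl min t < t
      · rw [if_pos h2]
        have : rest.foldl min t ≠ t := by omega
        simp [List.count_cons, this]
        omega
      · rw [if_neg h2]
        have ht : rest.foldl min t = t := by omega
        simp [List.count_cons, ht]
        omega
    · by_cases h2 : t = m
      · rw [show (if t < (m, c).1 then (t, (1:Int)) else if t = (m,c).1 then ((m,c).1, (m,c).2+1) else (m,c)) = (m, c + 1) by simp [h1, h2]]
        rw [ih m (c+1)]
        have hmt : min m t = m := by omega
        rw [hmt] at hMle ⊢
        by_cases h3 : rest.foldl min m < m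
        · rw [if_pos h3, if_pos h3]
          have : rest.foldl min m ≠ t := by omega
          simp [List.count_cons, this]
          omega
        · rw [if_neg h3, if_neg h3]
          have ht : rest.foldl min m = m := by omega
          simp [List.count_cons, ht, h2]
          omega
      · rw [show (if t < (m, c).1 then (t, (1:Int)) else if t = (m,c).1 then ((m,c).1, (m,c).2+1) else (m,c)) = (m, c) by simp [h1, h2]]
        rw [ih m c]
        have hmt : min m t = m := by omega
        rw [hmt] at hMle ⊢
        have hne : rest.foldl min m ≠ t := by omega
        simp [List.count_cons, hne, Ne.symm hne]

lemma foldl_min_swap (l : List Int) : ∀ (a b : Int),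
    l.foldl min (min a b) = min a (l.foldl min b) := by
  induction l with
  | nil => intro a b; simp
  | cons y t ih =>
    intro a b
    simp only [List.foldl_cons]
    rw [min_assoc, ih]

/-- B's even/odd comprehensions are `selP`. -/
lemma selP_alt (heights : List Int) (M : Nat) (r : Int) :
    ((PySem.List.pyRange 0 (M : Int) 1).filter (fun k => PySem.Int.mod k 2 == r)).map
        (fun k => PySem.List.pyGetD heights k 0)
      = selP heights M r := by
  rw [show (PySem.List.pyRange 0 (M : Int) 1) = (List.range M).map (fun k => ((k : Nat) : Int)) from
    PySem.List.pyRange_zero_nat M]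
  rw [List.filter_map, List.map_map]
  unfold selP
  have hpred : ∀ k : Nat,
      ((fun k : Int => PySem.Int.mod k 2 == r) ∘ (fun k : Nat => ((k : Nat) : Int))) k
        = (((k % 2 : Nat) : Int) == r) := by
    intro k
    simp only [Function.comp]
    congr 1
    exact_mod_cast PySem.Int.mod_natCast k 2
  rw [List.filter_congr (fun k _ => hpred k)]
  apply List.map_congr_left
  intro k _
  simp [PySem.List.pyGetD_natCast]

lemma selP_lengths (heights : List Int) (M : Nat) :
    (selP heights M 0).length + (selP heights M 1).length = M := by
  unfold selP
  simp only [List.length_map]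
  rw [← List.countP_eq_length_filter, ← List.countP_eq_length_filter]
  have h : ∀ k ∈ List.range M,
      ((((k % 2 : Nat) : Int) == 1) = true
        ↔ (decide ¬((((k % 2 : Nat) : Int) == 0) = true)) = true) := by
    intro k _
    have h2 : k % 2 = 0 ∨ k % 2 = 1 := by omega
    rcases h2 with h | h <;> simp [h]
  rw [List.countP_congr h]
  rw [← List.length_eq_countP_add_countP (fun k : Nat => ((k % 2 : Nat) : Int) == 0)
    (l := List.range M)]
  exact List.length_range ..

lemma selP_mem (heights : List Int) (M : Nat) (r : Int) (hM : M ≤ heights.length)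
    (x : Int) (hx : x ∈ selP heights M r) : x ∈ heights.take M := by
  unfold selP at hx
  obtain ⟨k, hk, rfl⟩ := List.mem_map.mp hx
  have hkM : k < M := List.mem_range.mp (List.mem_of_mem_filter hk)
  have hklen : k < heights.length := by omega
  rw [List.getD_eq_getElem _ _ hklen]
  have : heights[k] = (heights.take M)[k]'(by simp [List.length_take]; omega) := by
    rw [List.getElem_take]
  rw [this]
  exact List.getElem_mem _

-- ===== VERDICT (by name: the statement is the Claim_ definition above) =====
lemma take_bound (heights : List Int) (M H : Nat) (hMlen : M ≤ heights.length)
    (hbnd : ∀ x ∈ heights.take M, 0 ≤ x ∧ x ≤ (H : Int)) :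
    ∀ k, k < M → 0 ≤ heights.getD k 0 ∧ heights.getD k 0 ≤ (H : Int) := by
  intro k hk
  have hkl : k < heights.length := by omega
  apply hbnd
  rw [List.getD_eq_getElem _ _ hkl]
  have : heights[k] = (heights.take M)[k]'(by simp [List.length_take]; omega) := by
    rw [List.getElem_take]
  rw [this]
  exact List.getElem_mem _

lemma totalsOf_bound (heights : List Int) (M H : Nat) :
    ∀ t ∈ totalsOf heights M H, t ≤ (M : Int) := by
  intro t ht
  unfold totalsOf at ht
  obtain ⟨i, _, rfl⟩ := List.mem_map.mp ht
  have h0 := List.countP_le_length (p := fun x => decide (i ≤ x)) (l := selP heights M 0)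
  have h1 := List.countP_le_length (p := fun x => decide ((H:Int) - i + 1 ≤ x)) (l := selP heights M 1)
  have hlen := selP_lengths heights M
  unfold totFn
  omega

theorem solve_firefly_spec : Claim_equal_solve_firefly := by
  intro n h_ heights _dom hpre
  obtain ⟨hnlen, hc1, hc2, hbnd⟩ := hpre
  show solve_firefly n h_ heights = solve_firefly_alt n h_ heights
  by_cases htriv : n ≤ 0 ∧ h_ ≤ 0
  · -- no obstacles are read and there are no sections: both programs return (n, 0)
    have hA : solve_firefly n h_ heights = (n, 0) := by
      rw [solve_firefly_eq_list]
      unfold solveAL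
      rw [PySem.List.pyRange_one_eq_nil (by omega)]
      dsimp only [List.foldl_nil]
      rw [PySem.List.pyRange_neg_one_eq_nil (by omega),
        PySem.List.pyRange_one_eq_nil (by omega)]
      rfl
    have hB : solve_firefly_alt n h_ heights = (n, 0) := by
      unfold solve_firefly_alt
      rw [PySem.List.pyRange_one_eq_nil (show n ≤ 0 by omega),
        PySem.List.pyRange_one_eq_nil (show h_ + 1 ≤ 1 by omega)]
      rfl
    rw [hA, hB]
  · have hn0 : 0 ≤ n := by omega
    have hh0 : 0 ≤ h_ := by omega
    clear hc1 hc2 htriv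
    obtain ⟨M, rfl⟩ : ∃ M : Nat, n = (M : Int) := ⟨n.toNat, (Int.toNat_of_nonneg hn0).symm⟩
    obtain ⟨H, rfl⟩ : ∃ H : Nat, h_ = (H : Int) := ⟨h_.toNat, (Int.toNat_of_nonneg hh0).symm⟩
    have hMlen : M ≤ heights.length := by exact_mod_cast hnlen
    rw [Int.toNat_natCast] at hbnd
    show solve_firefly _ _ _ = solve_firefly_alt _ _ _
    have htake := take_bound heights M H hMlen hbnd
    have hsel : ∀ r : Int, ∀ x ∈ selP heights M r, 0 ≤ x ∧ x ≤ (H : Int) := by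
      intro r x hx
      exact hbnd x (selP_mem heights M r hMlen x hx)
    -- B side
    have hB : solve_firefly_alt (M : Int) (H : Int) heights =
        (match totalsOf heights M H with
         | [] => ((M : Int), (0 : Int))
         | _ :: _ =>
           match PySem.List.min? (totalsOf heights M H) (fun x => x) with
           | none => ((M : Int), (0 : Int))
           | some best => (best, (PySem.List.count (totalsOf heights M H) best : Int))) := by
      simp only [solve_firefly_alt, selP_alt]
      rfl
    -- A side, loop 1
    have hrep : (((H : Int)) + 1).toNat = H + 1 := by omega
    have hbM : ∀ k < M, 0 ≤ heights.getD k 0 ∧ (heights.getD k 0).toNat < H + 1 := by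
      intro k hk
      obtain ⟨h1, h2⟩ := htake k hk
      constructor
      · exact h1
      · omega
    have hA : solve_firefly (M : Int) (H : Int) heights =
        (PySem.List.pyRange 1 ((H : Int) + 1) 1).foldl
          (loop3bodyL
            ((PySem.List.pyRange ((H : Int) - 1) 0 (-1)).foldl suffStepL
              (hist (H + 1) (selP heights M 0)))
            ((PySem.List.pyRange ((H : Int) - 1) 0 (-1)).foldl suffStepL
              (hist (H + 1) (selP heights M 1)))
            (H : Int)) ((M : Int), 0) := by
      rw [solve_firefly_eq_list]
      simp only [solveAL, hrep]
      rw [show PySem.List.pyRange 0 ((M : Int)) 1 = (List.range M).map (fun k => ((k : Nat) : Int))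
          from PySem.List.pyRange_zero_nat M]
      rw [List.foldl_map, ← hist_nil (H + 1), loop1_eq heights (H + 1) M hMlen hbM]
      dsimp only
      rw [PySem.List.foldl_prod_mk (f := suffStepL) (g := suffStepL)]
    rw [hA, hB]
    by_cases hH : H = 0
    · subst hH
      rw [show (PySem.List.pyRange 1 ((0 : Nat) + 1) 1) = [] from
        PySem.List.pyRange_one_eq_nil (by norm_num)]
      rw [show totalsOf heights M 0 = [] by
        unfold totalsOf
        rw [show (PySem.List.pyRange 1 (((0 : Nat) : Int) + 1) 1) = [] from
          PySem.List.pyRange_one_eq_nil (by norm_num)]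
        rfl]
      rfl
    · -- H ≥ 1
      have h1H : 1 ≤ H := by omega
      rw [show ((H : Int) - 1) = (((H - 1 : Nat)) : Int) by omega]
      rw [hist_eq_mix H (selP heights M 0) h1H (fun x hx => (hsel 0 x hx).2),
          hist_eq_mix H (selP heights M 1) h1H (fun x hx => (hsel 1 x hx).2)]
      rw [loop2_run H _ (H - 1) (by omega), loop2_run H _ (H - 1) (by omega)]
      have hcong : ∀ (mc : Int × Int), ∀ i ∈ PySem.List.pyRange 1 ((H : Int) + 1) 1,
          loop3bodyL (mix (H + 1) (selP heights M 0) 0) (mix (H + 1) (selP heights M 1) 0)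
              (H : Int) mc i
            = sweepStep mc (totFn heights M H i) := by
        intro mc i hi
        rw [PySem.List.mem_pyRange_one] at hi
        obtain ⟨i', rfl⟩ : ∃ i' : Nat, i = ((i' : Nat) : Int) :=
          ⟨i.toNat, (Int.toNat_of_nonneg (by omega)).symm⟩
        have hi1 : 1 ≤ i' := by exact_mod_cast hi.1
        have hiH : i' ≤ H := by
          have := hi.2
          omega
        unfold loop3bodyL sweepStep totFn
        rw [mix_read H _ i' hi1 hiH]
        rw [show (H : Int) - (i' : Int) + 1 = (((H + 1 - i' : Nat)) : Int) by omega]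
        rw [mix_read H _ (H + 1 - i') (by omega) (by omega)]
      rw [PySem.List.foldl_congr_mem _ _ _ _ hcong]
      rw [← List.foldl_map (f := totFn heights M H) (g := sweepStep),
        show (PySem.List.pyRange 1 ((H : Int) + 1) 1).map (totFn heights M H)
            = totalsOf heights M H from rfl]
      obtain ⟨t0, rest, hsplit⟩ : ∃ t0 rest, totalsOf heights M H = t0 :: rest := by
        cases hcc : totalsOf heights M H with
        | nil =>
          exfalso
          have : (totalsOf heights M H).length = H := by
            unfold totalsOf
            rw [List.length_map, PySem.List.length_pyRange_one]
            omega
          rw [hcc] at this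
          simp at this
          omega
        | cons a b => exact ⟨a, b, rfl⟩
      have htotb := totalsOf_bound heights M H
      rw [hsplit] at htotb ⊢
      show (t0 :: rest).foldl sweepStep ((M : Int), 0)
          = match PySem.List.min? (t0 :: rest) (fun x => x) with
            | none => ((M : Int), (0 : Int))
            | some best => (best, (PySem.List.count (t0 :: rest) best : Int))
      rw [show (t0 :: rest).foldl sweepStep (((M : Int)), 0)
            = ((t0 :: rest).foldl min ((M : Int)),
               if (t0 :: rest).foldl min ((M : Int)) < ((M : Int)) then
                 (((t0 :: rest).count ((t0 :: rest).foldl min ((M : Int)))) : Int)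
               else 0 + (((t0 :: rest).count ((t0 :: rest).foldl min ((M : Int)))) : Int))
          from sweep_eq (t0 :: rest) ((M : Int)) 0]
      rw [PySem.List.min?_id_cons]
      have hbest_le : rest.foldl min t0 ≤ t0 := (PySem.List.foldl_min_le rest t0).1
      have ht0M : t0 ≤ (M : Int) := htotb t0 (by simp)
      have hfold : (t0 :: rest).foldl min ((M : Int)) = rest.foldl min t0 := by
        rw [List.foldl_cons, show min ((M : Int)) t0 = min ((M : Int)) t0 from rfl, foldl_min_swap]
        omega
      rw [hfold]
      dsimp only
      rw [PySem.List.count_eq]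
      split_ifs with hlt
      · rfl
      · simp
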